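-- pv_equiv track=rewrite | github.com/LLewark/khoca | bin/pseudoBraidToKrasnerGaussLib.py | pseudoBraidToKrasnerGaussMain
-- ===== SOURCE A (Python) =====
-- def pseudoBraidToKrasnerGaussMain(inputList):
-- 	strands = max(inputList) + 1
-- 	if (strands % 2 == 1):
-- 		strands += 1
--
-- 	direction = -1
-- 	enum = [0 for i in range(len(inputList))]
-- 	result = [0 for i in range(2*len(inputList))]
-- 	num = 1
-- 	for i in range(strands):
-- 		idx = [j for j in range(len(inputList)) if (abs(inputList[j]) in [i, i+1])]
-- 		if (direction == -1):
-- 			idx.reverse()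
-- 		direction *= -1
-- 		for j in idx:
-- 			if (abs(inputList[j]) == i+1):
-- 				enum[j] = num
-- 			else:
-- 				result[enum[j] - 1] = num * inputList[j] / abs(inputList[j])
-- 			num += 1
--
-- 	return [int(i) for i in result if (i != 0)]
-- ===== SOURCE B (Python) =====
-- def pseudoBraidToKrasnerGaussMain(inputList):
-- 	n = len(inputList)
-- 	strands = max(inputList) + 1
-- 	if strands % 2 == 1:
-- 		strands += 1
-- 	# bucket positions by abs(value), once; each bucket is ascending
-- 	buckets = {}
-- 	for j in range(n):
-- 		a = abs(inputList[j])
-- 		buckets[a] = buckets.get(a, []) + [j]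
-- 	enum = [0] * n
-- 	result = [0] * (2 * n)
-- 	num = 1
-- 	for i in range(strands):
-- 		idx = _merge(buckets.get(i, []), buckets.get(i + 1, []))
-- 		if i % 2 == 0:
-- 			idx.reverse()
-- 		for j in idx:
-- 			if abs(inputList[j]) == i + 1:
-- 				enum[j] = num
-- 			else:
-- 				result[enum[j] - 1] = num if inputList[j] > 0 else -num
-- 			num += 1
-- 	return [x for x in result if x != 0]
--
--
-- def _merge(xs, ys):
-- 	# merge two ascending lists of positions
-- 	out = []
-- 	p, q = 0, 0
-- 	while p < len(xs) and q < len(ys):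
-- 		if xs[p] <= ys[q]:
-- 			out.append(xs[p]); p += 1
-- 		else:
-- 			out.append(ys[q]); q += 1
-- 	out.extend(xs[p:])
-- 	out.extend(ys[q:])
-- 	return out
-- ===== Notes on version B (the rewrite author's own statement) =====
-- stated objective: faster
-- what changed: B buckets positions by abs(value) in one pass over the input and builds each strand's index list by merging two adjacent already-sorted buckets, replacing A's full rescan of the whole input for every strand; the float division num*x/abs(x) is replaced by a sign test.
-- outside the precondition, e.g. on pseudoBraidToKrasnerGaussMain([]): A raises ValueError, B raises ValueError; on pseudoBraidToKrasnerGaussMain([0, 1]): A raises ZeroDivisionError, B returns [3, -2]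
import Mathlib
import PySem

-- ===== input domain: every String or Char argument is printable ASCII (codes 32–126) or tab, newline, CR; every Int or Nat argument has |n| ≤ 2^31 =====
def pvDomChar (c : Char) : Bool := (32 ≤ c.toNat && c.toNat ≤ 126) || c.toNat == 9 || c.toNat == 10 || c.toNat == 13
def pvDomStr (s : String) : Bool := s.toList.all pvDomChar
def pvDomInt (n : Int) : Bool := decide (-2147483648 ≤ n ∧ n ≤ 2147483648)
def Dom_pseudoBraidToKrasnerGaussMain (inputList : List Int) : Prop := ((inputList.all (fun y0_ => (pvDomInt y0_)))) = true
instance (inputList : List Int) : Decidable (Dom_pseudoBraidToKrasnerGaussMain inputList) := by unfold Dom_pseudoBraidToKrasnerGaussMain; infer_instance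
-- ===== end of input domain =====

-- B replaces A's per-strand rescan of the whole input by one bucketing pass (positions grouped by
-- abs(value)) plus a merge of two adjacent sorted buckets per strand, and replaces the float
-- division num*x/abs(x) by a sign test; objective: faster (O(n+s) inner work instead of O(n*s)).

-- ===== PORT A =====
-- Python list assignment result[k] = v with an int k (negative k wraps; out of range = IndexError,
-- which never fires inside Pre_).
def pvSetIdx (xs : List Int) (k : Int) (v : Int) : List Int :=
  let k' := if k < 0 then k + xs.length else k
  if 0 ≤ k' ∧ k' < xs.length then xs.set k'.toNat v else xs

-- body of A's inner 'for j in idx' loop; 'num * inputList[j] / abs(...)' is Python float division,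
-- exact here because |v| divides num*v (= ±num); for v = 0 Python raises ZeroDivisionError (outside Pre_).
def pvAInner (inputList : List Int) (i : Int) (t : List Int × List Int × Int) (j : Nat) :
    List Int × List Int × Int :=
  let (enum, result, num) := t
  let v := inputList.getD j 0
  if |v| == i + 1 then (enum.set j num, result, num + 1)
  else (enum, pvSetIdx result (enum.getD j 0 - 1) (num * v / |v|), num + 1)

-- body of A's outer 'for i in range(strands)' loop; state (enum, result, num, direction)
def pvAOuter (inputList : List Int) (s : List Int × List Int × Int × Int) (i : Int) :
    List Int × List Int × Int × Int :=
  let (enum, result, num, direction) := s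
  let idx := (List.range inputList.length).filter
      (fun j => |inputList.getD j 0| == i || |inputList.getD j 0| == i + 1)
  let idx := if direction == -1 then idx.reverse else idx
  let direction := direction * -1
  let r := idx.foldl (pvAInner inputList i) (enum, result, num)
  (r.1, r.2.1, r.2.2, direction)

def pseudoBraidToKrasnerGaussMain (inputList : List Int) : List Int :=
  match PySem.List.max? inputList (fun x => x) with
  | none => []      -- Python: max([]) raises ValueError (outside Pre_)
  | some m =>
    let strands := m + 1
    let strands := if PySem.Int.mod strands 2 == 1 then strands + 1 else strands
    let n := inputList.length
    let fin := (PySem.List.pyRange 0 strands 1).foldl (pvAOuter inputList)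
      (List.replicate n 0, List.replicate (2*n) 0, 1, -1)
    -- [int(i) for i in result if i != 0]: int() is the identity on these (integral) values
    fin.2.1.filter (fun x => x ≠ 0)

-- ===== PORT B =====
-- hand-written two-pointer merge from Source B (ported as structural recursion on both lists)
def pvMerge : List Nat → List Nat → List Nat
  | [], ys => ys
  | x :: xs, [] => x :: xs
  | x :: xs, y :: ys =>
    if x ≤ y then x :: pvMerge xs (y :: ys) else y :: pvMerge (x :: xs) ys
termination_by xs ys => xs.length + ys.length

-- one bucketing pass: buckets[a] = buckets.get(a, []) + [j]
def pvBuckets (inputList : List Int) : PySem.Dict Int (List Nat) :=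
  (List.range inputList.length).foldl
    (fun d j =>
      let a := |inputList.getD j 0|
      PySem.Dict.insert d a (PySem.Dict.getD d a [] ++ [j]))
    PySem.Dict.empty

-- body of B's inner loop
def pvBInner (inputList : List Int) (i : Int) (t : List Int × List Int × Int) (j : Nat) :
    List Int × List Int × Int :=
  let (enum, result, num) := t
  let v := inputList.getD j 0
  if |v| == i + 1 then (enum.set j num, result, num + 1)
  else (enum, pvSetIdx result (enum.getD j 0 - 1) (if v > 0 then num else -num), num + 1)

-- body of B's outer loop; state (enum, result, num)
def pvBOuter (inputList : List Int) (buckets : PySem.Dict Int (List Nat))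
    (s : List Int × List Int × Int) (i : Int) : List Int × List Int × Int :=
  let idx := pvMerge (buckets.getD i []) (buckets.getD (i + 1) [])
  let idx := if PySem.Int.mod i 2 == 0 then idx.reverse else idx
  idx.foldl (pvBInner inputList i) s

def pseudoBraidToKrasnerGaussMain_alt (inputList : List Int) : List Int :=
  match PySem.List.max? inputList (fun x => x) with
  | none => []      -- Python: max([]) raises ValueError (outside Pre_)
  | some m =>
    let strands := m + 1
    let strands := if PySem.Int.mod strands 2 == 1 then strands + 1 else strands
    let n := inputList.length
    let buckets := pvBuckets inputList
    let fin := (PySem.List.pyRange 0 strands 1).foldl (pvBOuter inputList buckets)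
      (List.replicate n 0, List.replicate (2*n) 0, 1)
    fin.2.1.filter (fun x => x ≠ 0)

-- ===== PRECONDITION & SPEC =====
-- Pre_ excludes exactly the inputs on which A raises: the empty list (ValueError from max([]))
-- and lists containing 0 (ZeroDivisionError from inputList[j] / abs(inputList[j])).
def Pre_pseudoBraidToKrasnerGaussMain (inputList : List Int) : Prop :=
  inputList ≠ [] ∧ (0 : Int) ∉ inputList
instance (inputList : List Int) : Decidable (Pre_pseudoBraidToKrasnerGaussMain inputList) := by
  unfold Pre_pseudoBraidToKrasnerGaussMain; infer_instance

def pvWitness_pseudoBraidToKrasnerGaussMain : List Int := [1, -2, 1]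

def Spec_pseudoBraidToKrasnerGaussMain (inputList : List Int) (out : List Int) : Prop :=
  out = pseudoBraidToKrasnerGaussMain_alt inputList
instance (inputList : List Int) (out : List Int) :
    Decidable (Spec_pseudoBraidToKrasnerGaussMain inputList out) := by
  unfold Spec_pseudoBraidToKrasnerGaussMain; infer_instance

-- ===== CLAIM (what is proved, stated in full; the proofs are below) =====
def Claim_equal_pseudoBraidToKrasnerGaussMain : Prop :=
  ∀ (inputList : List Int), Dom_pseudoBraidToKrasnerGaussMain inputList →
    Pre_pseudoBraidToKrasnerGaussMain inputList →
    Spec_pseudoBraidToKrasnerGaussMain inputList (pseudoBraidToKrasnerGaussMain inputList)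

-- ===== LEMMAS AND PROOFS =====

theorem pvMerge_nil_right (xs : List Nat) : pvMerge xs [] = xs := by
  cases xs <;> simp [pvMerge]

theorem pvMerge_cons_left {a : Nat} (xs ys : List Nat) (h : ∀ y ∈ ys, a ≤ y) :
    pvMerge (a :: xs) ys = a :: pvMerge xs ys := by
  cases ys with
  | nil => simp [pvMerge_nil_right]
  | cons b ys => simp [pvMerge, h b (by simp)]

theorem pvMerge_cons_right {a : Nat} (xs ys : List Nat) (h : ∀ x ∈ xs, a < x) :
    pvMerge xs (a :: ys) = a :: pvMerge xs ys := by
  cases xs with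
  | nil => simp [pvMerge]
  | cons x xs =>
    have : ¬ x ≤ a := by exact Nat.not_le.mpr (h x (by simp))
    simp [pvMerge, this]

-- merging two filters of a strictly sorted list with disjoint predicates = filter of the disjunction
theorem pvMerge_filter (l : List Nat) (p q : Nat → Bool)
    (hd : ∀ x, ¬(p x = true ∧ q x = true)) (hs : l.Pairwise (· < ·)) :
    pvMerge (l.filter p) (l.filter q) = l.filter (fun x => p x || q x) := by
  induction l with
  | nil => simp [pvMerge]
  | cons a l ih =>
    have hlt : ∀ b ∈ l, a < b := (List.pairwise_cons.mp hs).1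
    have hs' := (List.pairwise_cons.mp hs).2
    by_cases hp : p a = true
    · have hq : q a = false := by
        cases hqa : q a with
        | false => rfl
        | true => exact absurd ⟨hp, hqa⟩ (hd a)
      have hle : ∀ y ∈ l.filter q, a ≤ y :=
        fun y hy => Nat.le_of_lt (hlt y (List.mem_of_mem_filter hy))
      simp only [List.filter_cons, hp, hq, Bool.false_eq_true, if_true, if_false, Bool.true_or]
      rw [pvMerge_cons_left _ _ hle, ih hs']
    · have hp' : p a = false := by
        cases hpa : p a with
        | false => rfl
        | true => exact absurd hpa hp
      by_cases hq : q a = true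
      · have hlt' : ∀ x ∈ l.filter p, a < x :=
          fun x hx => hlt x (List.mem_of_mem_filter hx)
        simp only [List.filter_cons, hp', hq, Bool.false_eq_true, if_true, if_false,
          Bool.false_or]
        rw [pvMerge_cons_right _ _ hlt', ih hs']
      · have hq' : q a = false := by
          cases hqa : q a with
          | false => rfl
          | true => exact absurd hqa hq
        simp only [List.filter_cons, hp', hq', Bool.false_eq_true, if_false, Bool.false_or]
        exact ih hs'

-- the bucket dict looks up to exactly A's filter by abs value
theorem pvBuckets_fold (inputList : List Int) (l : List Nat) (d : PySem.Dict Int (List Nat))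
    (a : Int) :
    PySem.Dict.getD
      (l.foldl (fun d j =>
        PySem.Dict.insert d (|inputList.getD j 0|) (PySem.Dict.getD d (|inputList.getD j 0|) [] ++ [j])) d)
      a [] = PySem.Dict.getD d a [] ++ l.filter (fun j => |inputList.getD j 0| == a) := by
  induction l generalizing d with
  | nil => simp
  | cons j l ih =>
    simp only [List.foldl_cons, List.filter_cons]
    rw [ih]
    by_cases h : |inputList.getD j 0| = a
    · subst h
      rw [PySem.Dict.getD_insert_self]
      simp only [beq_self_eq_true, if_true, List.append_assoc, List.singleton_append]
    · rw [PySem.Dict.getD_insert_of_ne _ _ _ (Ne.symm h)]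
      have hb : (|inputList.getD j 0| == a) = false := by simpa using h
      rw [hb]
      simp only [Bool.false_eq_true, if_false]

theorem pvBuckets_getD (inputList : List Int) (a : Int) :
    PySem.Dict.getD (pvBuckets inputList) a [] =
      (List.range inputList.length).filter (fun j => |inputList.getD j 0| == a) := by
  unfold pvBuckets
  rw [pvBuckets_fold]
  simp

-- exact float division in A's else-branch equals B's sign test (v ≠ 0)
theorem pvSign_eq (num v : Int) (hv : v ≠ 0) :
    num * v / |v| = if v > 0 then num else -num := by
  rcases lt_trichotomy v 0 with h | h | h
  · rw [if_neg (by omega), abs_of_neg h]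
    rw [show num * v = (-num) * (-v) by ring]
    exact Int.mul_ediv_cancel _ (by omega)
  · omega
  · rw [if_pos h, abs_of_pos h]
    exact Int.mul_ediv_cancel _ (by omega)

-- the two inner-loop bodies agree on in-range positions when 0 ∉ inputList
theorem pvInner_eq (inputList : List Int) (h0 : (0 : Int) ∉ inputList) (i : Int)
    (t : List Int × List Int × Int) (j : Nat) (hj : j < inputList.length) :
    pvAInner inputList i t j = pvBInner inputList i t j := by
  obtain ⟨enum, result, num⟩ := t
  have hv : inputList.getD j 0 ≠ 0 := by
    intro h
    rw [List.getD_eq_getElem _ _ hj] at h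
    exact h0 (h ▸ List.getElem_mem hj)
  simp only [pvAInner, pvBInner, pvSign_eq _ _ hv]

-- B's per-strand index list is A's
theorem pvIdx_eq (inputList : List Int) (i : Int) :
    pvMerge (PySem.Dict.getD (pvBuckets inputList) i [])
            (PySem.Dict.getD (pvBuckets inputList) (i + 1) []) =
    (List.range inputList.length).filter
      (fun j => |inputList.getD j 0| == i || |inputList.getD j 0| == i + 1) := by
  rw [pvBuckets_getD, pvBuckets_getD]
  exact pvMerge_filter _ _ _
    (by intro x ⟨h1, h2⟩; simp at h1 h2; omega)
    (List.pairwise_lt_range)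

-- outer loop: A's state minus the direction component equals B's state, where
-- direction = -1 exactly on even loop counters
theorem pvLoop_eq (inputList : List Int) (h0 : (0 : Int) ∉ inputList) (strands : Int) :
    ∀ (k : Nat) (a : Int), (strands - a).toNat = k →
    ∀ (enum result : List Int) (num d : Int),
      d = (if PySem.Int.mod a 2 == 0 then (-1 : Int) else 1) →
      (((PySem.List.pyRange a strands 1).foldl (pvAOuter inputList) (enum, result, num, d)).1,
       ((PySem.List.pyRange a strands 1).foldl (pvAOuter inputList) (enum, result, num, d)).2.1,
       ((PySem.List.pyRange a strands 1).foldl (pvAOuter inputList) (enum, result, num, d)).2.2.1) =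
      (PySem.List.pyRange a strands 1).foldl (pvBOuter inputList (pvBuckets inputList))
        (enum, result, num) := by
  intro k
  induction k with
  | zero =>
    intro a ha enum result num d hd
    rw [PySem.List.pyRange_one_eq_nil (by omega)]
    rfl
  | succ k ih =>
    intro a ha enum result num d hd
    by_cases hlt : a < strands
    · rw [PySem.List.pyRange_one_cons hlt]
      simp only [List.foldl_cons]
      have hmod : PySem.Int.mod a 2 = a % 2 := PySem.Int.mod_eq_emod_of_pos (by omega)
      have hmod1 : PySem.Int.mod (a + 1) 2 = (a + 1) % 2 := PySem.Int.mod_eq_emod_of_pos (by omega)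
      have hdir : (d == -1) = (PySem.Int.mod a 2 == 0) := by
        subst hd
        rw [hmod]
        by_cases h : a % 2 = 0
        · simp [h]
        · have h1 : a % 2 = 1 := by omega
          simp [h1]
      have hfold : ∀ (idx : List Nat),
          (∀ j ∈ idx, j < inputList.length) →
          idx.foldl (pvAInner inputList a) (enum, result, num) =
            idx.foldl (pvBInner inputList a) (enum, result, num) := by
        intro idx hmem
        exact PySem.List.foldl_congr_mem _ _ _ _
          (fun t j hj => pvInner_eq inputList h0 a t j (hmem j hj))
      have hmemF : ∀ j ∈ (List.range inputList.length).filter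
          (fun j => |inputList.getD j 0| == a || |inputList.getD j 0| == a + 1),
          j < inputList.length := by
        intro j hj
        have := List.mem_of_mem_filter hj
        simpa using this
      have hstep : pvAOuter inputList (enum, result, num, d) a =
          ((pvBOuter inputList (pvBuckets inputList) (enum, result, num) a).1,
           (pvBOuter inputList (pvBuckets inputList) (enum, result, num) a).2.1,
           (pvBOuter inputList (pvBuckets inputList) (enum, result, num) a).2.2,
           d * -1) := by
        simp only [pvAOuter, pvBOuter, pvIdx_eq inputList a]
        rw [hdir]
        by_cases hc : (PySem.Int.mod a 2 == 0) = true
        · rw [if_pos hc]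
          rw [hfold _ (fun j hj => hmemF j (by simpa using hj))]
        · rw [if_neg hc]
          rw [hfold _ hmemF]
      rw [hstep]
      have hd' : d * -1 = (if PySem.Int.mod (a + 1) 2 == 0 then (-1 : Int) else 1) := by
        subst hd
        rw [hmod, hmod1]
        by_cases h : a % 2 = 0
        · have h1 : (a + 1) % 2 = 1 := by omega
          simp [h, h1]
        · have h0' : a % 2 = 1 := by omega
          have h1 : (a + 1) % 2 = 0 := by omega
          simp [h0', h1]
      exact ih (a + 1) (by omega)
        (pvBOuter inputList (pvBuckets inputList) (enum, result, num) a).1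
        (pvBOuter inputList (pvBuckets inputList) (enum, result, num) a).2.1
        (pvBOuter inputList (pvBuckets inputList) (enum, result, num) a).2.2
        (d * -1) hd'
    · rw [PySem.List.pyRange_one_eq_nil (by omega)]
      rfl

-- ===== VERDICT (by name: the statement is the Claim_ definition above) =====
theorem pseudoBraidToKrasnerGaussMain_spec : Claim_equal_pseudoBraidToKrasnerGaussMain := by
  intro inputList _ hpre
  unfold Spec_pseudoBraidToKrasnerGaussMain
  unfold pseudoBraidToKrasnerGaussMain pseudoBraidToKrasnerGaussMain_alt
  cases hmax : PySem.List.max? inputList (fun x => x) with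
  | none => rfl
  | some m =>
    dsimp only
    have h := pvLoop_eq inputList hpre.2
      (if PySem.Int.mod (m + 1) 2 == 1 then m + 1 + 1 else m + 1)
      (if PySem.Int.mod (m + 1) 2 == 1 then m + 1 + 1 else m + 1).toNat 0 (by omega)
      (List.replicate inputList.length 0)
      (List.replicate (2 * inputList.length) 0) 1 (-1) (by decide)
    have h2 := congrArg (fun t => t.2.1) h
    dsimp only at h2
    rw [h2]
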